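-- pv_equiv track=rewrite | github.com/ben1957mit/Transportation-asst-app | utils/layout_engine.py | auto_place_pallets
-- ===== SOURCE A (Python) =====
-- TRAILER_LENGTH_IN = 636  # 53' trailer
--
-- PALLET_LENGTH_IN = 48
--
-- PALLET_WIDTH_IN = 40
--
-- def auto_place_pallets(pallet_weights):
--     """
--     Simple auto-placement:
--     - Sort pallets heaviest to lightest
--     - Place heaviest near drive axles (roughly middle-back)
--     - Fill forward and rear from there
--     Returns list of pallet dicts: {x, y, length, width, weight}
--     """
--
--     # Zones (rough approximation in inches from nose)
--     nose_zone_start = 0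
--     nose_zone_end = 144          # first 12'
--     drive_zone_start = 144       # 12'
--     drive_zone_end = 432         # 36'
--     tail_zone_start = 432        # last 18'
--     tail_zone_end = TRAILER_LENGTH_IN
--
--     # Sort heaviest first
--     sorted_weights = sorted(pallet_weights, reverse=True)
--
--     pallets = []
--     current_x_drive = drive_zone_start
--     current_x_nose = nose_zone_start
--     current_x_tail = tail_zone_start
--     lane_y_positions = [0, PALLET_WIDTH_IN]  # two lanes side by side
--
--     lane_index_drive = 0
--     lane_index_nose = 0
--     lane_index_tail = 0
--
--     for w in sorted_weights:
--         # Heavier pallets → drive zone first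
--         if current_x_drive + PALLET_LENGTH_IN <= drive_zone_end:
--             pallets.append({
--                 "x": current_x_drive,
--                 "y": lane_y_positions[lane_index_drive],
--                 "length": PALLET_LENGTH_IN,
--                 "width": PALLET_WIDTH_IN,
--                 "weight": w,
--             })
--             lane_index_drive = 1 - lane_index_drive
--             if lane_index_drive == 0:
--                 current_x_drive += PALLET_LENGTH_IN
--
--         # Then nose
--         elif current_x_nose + PALLET_LENGTH_IN <= nose_zone_end:
--             pallets.append({
--                 "x": current_x_nose,
--                 "y": lane_y_positions[lane_index_nose],
--                 "length": PALLET_LENGTH_IN,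
--                 "width": PALLET_WIDTH_IN,
--                 "weight": w,
--             })
--             lane_index_nose = 1 - lane_index_nose
--             if lane_index_nose == 0:
--                 current_x_nose += PALLET_LENGTH_IN
--
--         # Then tail
--         elif current_x_tail + PALLET_LENGTH_IN <= tail_zone_end:
--             pallets.append({
--                 "x": current_x_tail,
--                 "y": lane_y_positions[lane_index_tail],
--                 "length": PALLET_LENGTH_IN,
--                 "width": PALLET_WIDTH_IN,
--                 "weight": w,
--             })
--             lane_index_tail = 1 - lane_index_tail
--             if lane_index_tail == 0:
--                 current_x_tail += PALLET_LENGTH_IN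
--
--         else:
--             # No more room – ignore extras for now
--             break
--
--     return pallets
-- ===== SOURCE B (Python) =====
-- TRAILER_LENGTH_IN = 636  # 53' trailer
-- PALLET_LENGTH_IN = 48
-- PALLET_WIDTH_IN = 40
--
-- def auto_place_pallets(pallet_weights):
--     # Precompute the fixed 26 placement slots (drive, then nose, then tail;
--     # two lanes per x position), then pair them with the weights sorted
--     # heaviest-first; zip truncates at whichever runs out.
--     slots = []
--     for start, end in ((144, 432), (0, 144), (432, TRAILER_LENGTH_IN)):
--         for x in range(start, end - PALLET_LENGTH_IN + 1, PALLET_LENGTH_IN):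
--             slots.append((x, 0))
--             slots.append((x, PALLET_WIDTH_IN))
--     return [
--         {"x": x, "y": y, "length": PALLET_LENGTH_IN, "width": PALLET_WIDTH_IN, "weight": w}
--         for w, (x, y) in zip(sorted(pallet_weights, reverse=True), slots)
--     ]
-- ===== Notes on version B (the rewrite author's own statement) =====
-- stated objective: simpler
-- what changed: Replaces A's stateful per-pallet zone-branching loop (three cursors and three lane flags) by precomputing the fixed ordered list of 26 placement slots and zipping it with the descending-sorted weights.
import Mathlib
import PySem

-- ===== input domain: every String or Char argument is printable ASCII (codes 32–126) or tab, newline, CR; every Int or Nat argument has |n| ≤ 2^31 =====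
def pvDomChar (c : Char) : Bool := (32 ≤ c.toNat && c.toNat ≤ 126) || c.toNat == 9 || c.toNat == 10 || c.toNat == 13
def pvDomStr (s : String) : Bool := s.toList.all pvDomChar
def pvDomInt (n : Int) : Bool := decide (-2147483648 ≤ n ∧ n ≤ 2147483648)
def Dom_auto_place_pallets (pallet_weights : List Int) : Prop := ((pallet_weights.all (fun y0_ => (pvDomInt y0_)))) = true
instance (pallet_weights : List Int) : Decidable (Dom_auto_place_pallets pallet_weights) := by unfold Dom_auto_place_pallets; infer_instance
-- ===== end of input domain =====

-- B replaces A's per-pallet zone-branching loop by a precomputed table of the 26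
-- placement slots zipped with the descending-sorted weights (objective: simpler).

-- ===== PORT A =====

-- lane_y_positions[i] for i ∈ {0, 1} (A only ever indexes with 0 or 1)
def laneY (i : Int) : Int := if i == 0 then 0 else 40

-- the pallet dict {x, y, length, width, weight} in insertion order
def aDict (x y w : Int) : List (String × Int) :=
  [("x", x), ("y", y), ("length", 48), ("width", 40), ("weight", w)]

-- state: current_x_drive / nose / tail and lane_index_drive / nose / tail
structure AState where
  xd : Int
  xn : Int
  xt : Int
  ld : Int
  ln : Int
  lt : Int
deriving DecidableEq, Repr

-- one iteration of A's loop body: which (x, y) is appended and the new state,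
-- or none at the final `break`
def aStep (st : AState) : Option ((Int × Int) × AState) :=
  if st.xd + 48 ≤ 432 then
    let ld' := 1 - st.ld
    some ((st.xd, laneY st.ld), { st with xd := if ld' = 0 then st.xd + 48 else st.xd, ld := ld' })
  else if st.xn + 48 ≤ 144 then
    let ln' := 1 - st.ln
    some ((st.xn, laneY st.ln), { st with xn := if ln' = 0 then st.xn + 48 else st.xn, ln := ln' })
  else if st.xt + 48 ≤ 636 then
    let lt' := 1 - st.lt
    some ((st.xt, laneY st.lt), { st with xt := if lt' = 0 then st.xt + 48 else st.xt, lt := lt' })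
  else none

def aLoop : List Int → AState → List (List (String × Int)) → List (List (String × Int))
  | [], _, acc => acc
  | w :: ws, st, acc =>
    match aStep st with
    | some ((x, y), st') => aLoop ws st' (acc ++ [aDict x y w])
    | none => acc

def auto_place_pallets (pallet_weights : List Int) : List (List (String × Int)) :=
  aLoop (PySem.List.sorted pallet_weights (fun x => x) true) ⟨144, 0, 432, 0, 0, 0⟩ []

-- ===== PORT B =====

-- the fixed placement slots: drive, then nose, then tail zone; two lanes per x
def bSlots : List (Int × Int) :=
  ([(144, 432), (0, 144), (432, 636)] : List (Int × Int)).flatMap (fun se =>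
    (PySem.List.pyRange se.1 (se.2 - 48 + 1) 48).flatMap (fun x => [(x, 0), (x, 40)]))

def bEntry (w x y : Int) : List (String × Int) :=
  [("x", x), ("y", y), ("length", 48), ("width", 40), ("weight", w)]

def auto_place_pallets_alt (pallet_weights : List Int) : List (List (String × Int)) :=
  (List.zip (PySem.List.sorted pallet_weights (fun x => x) true) bSlots).map
    (fun p => bEntry p.1 p.2.1 p.2.2)

-- ===== PRECONDITION & SPEC =====
def Spec_auto_place_pallets (pallet_weights : List Int) (out : List (List (String × Int))) : Prop := out = auto_place_pallets_alt pallet_weights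
instance (pallet_weights : List Int) (out : List (List (String × Int))) : Decidable (Spec_auto_place_pallets pallet_weights out) := by unfold Spec_auto_place_pallets; infer_instance

-- ===== CLAIM (what is proved, stated in full; the proofs are below) =====
def Claim_equal_auto_place_pallets : Prop := ∀ (pallet_weights : List Int), Dom_auto_place_pallets pallet_weights → Spec_auto_place_pallets pallet_weights (auto_place_pallets pallet_weights)

-- ===== LEMMAS AND PROOFS =====
set_option maxRecDepth 10000

-- the state after k successful placements
def stateOf (k : Nat) : AState :=
  (fun st => match aStep st with | some (_, st') => st' | none => st)^[k] ⟨144, 0, 432, 0, 0, 0⟩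

lemma aStep_stateOf : ∀ k : Fin 26,
    aStep (stateOf k.val) = some (bSlots.getD k.val (0, 0), stateOf (k.val + 1)) := by
  decide

lemma aStep_stateOf_26 : aStep (stateOf 26) = none := by decide

lemma bSlots_length : bSlots.length = 26 := by decide

lemma aLoop_zip (ws : List Int) : ∀ (k : Nat), k ≤ 26 → ∀ acc,
    aLoop ws (stateOf k) acc
      = acc ++ (List.zip ws (bSlots.drop k)).map (fun p => bEntry p.1 p.2.1 p.2.2) := by
  induction ws with
  | nil => intro k _ acc; simp [aLoop]
  | cons w ws ih =>
    intro k hk acc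
    rcases Nat.lt_or_ge k 26 with hlt | hge
    · have hdrop : bSlots.drop k = bSlots.getD k (0, 0) :: bSlots.drop (k + 1) := by
        rw [List.drop_eq_getElem_cons (by rw [bSlots_length]; exact hlt)]
        simp [List.getD, List.getElem?_eq_getElem (by rw [bSlots_length]; exact hlt)]
      rw [hdrop]
      simp only [aLoop, aStep_stateOf ⟨k, hlt⟩, List.zip_cons_cons, List.map_cons]
      rw [ih (k + 1) hlt (acc ++ [aDict (bSlots.getD k (0, 0)).1 (bSlots.getD k (0, 0)).2 w])]
      simp [aDict, bEntry]
    · have hk26 : k = 26 := le_antisymm hk hge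
      subst hk26
      have : bSlots.drop 26 = [] := by decide
      simp [aLoop, aStep_stateOf_26, this]

-- ===== VERDICT (by name: the statement is the Claim_ definition above) =====
theorem auto_place_pallets_spec : Claim_equal_auto_place_pallets := by
  intro ws _
  show auto_place_pallets ws = auto_place_pallets_alt ws
  have h := aLoop_zip (PySem.List.sorted ws (fun x => x) true) 0 (by omega) []
  simpa [auto_place_pallets, auto_place_pallets_alt, stateOf] using h
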